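-- pv_equiv track=rewrite | github.com/8G4B/JEE6.v1 | src/interfaces/commands/channel/CleanCommand.py | _parse_clean_args
-- ===== SOURCE A (Python) =====
-- import shlex
--
-- def _parse_clean_args(arg):
--     if not arg:
--         return None
--
--     channel_name = None
--     tokens = shlex.split(arg)
--     i = 0
--     while i < len(tokens):
--         if (tokens[i] in ("-n", "--name")) and i + 1 < len(tokens):
--             channel_name = tokens[i + 1]
--             i += 2
--         else:
--             channel_name = arg
--             break
--
--     return channel_name
-- ===== SOURCE B (Python) =====
-- def _single(s, i):
--     # consume the body of a single-quoted segment starting at i (after the quote)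
--     buf = []
--     n = len(s)
--     while i < n:
--         if s[i] == "'":
--             return ''.join(buf), i + 1
--         buf.append(s[i])
--         i += 1
--     raise ValueError('No closing quotation')
--
--
-- def _double(s, i):
--     # consume the body of a double-quoted segment; backslash escapes only \ and "
--     buf = []
--     n = len(s)
--     while i < n:
--         c = s[i]
--         if c == '"':
--             return ''.join(buf), i + 1
--         if c == '\\':
--             if i + 1 >= n:
--                 raise ValueError('No escaped character')
--             d = s[i + 1]
--             buf.append(d if d in '\\"' else '\\' + d)
--             i += 2
--         else:
--             buf.append(c)
--             i += 1
--     raise ValueError('No closing quotation')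
--
--
-- def _token(s, i):
--     # consume one whole token starting at the non-whitespace position i
--     parts = []
--     n = len(s)
--     while i < n and s[i] not in ' \t\r\n':
--         c = s[i]
--         if c == '\\':
--             if i + 1 >= n:
--                 raise ValueError('No escaped character')
--             parts.append(s[i + 1])
--             i += 2
--         elif c == "'":
--             seg, i = _single(s, i + 1)
--             parts.append(seg)
--         elif c == '"':
--             seg, i = _double(s, i + 1)
--             parts.append(seg)
--         else:
--             parts.append(c)
--             i += 1
--     return ''.join(parts), i
--
--
-- def _split(s):
--     # POSIX shlex.split as a token-at-a-time scanner (segment consumers, no state machine)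
--     toks = []
--     i, n = 0, len(s)
--     while i < n:
--         if s[i] in ' \t\r\n':
--             i += 1
--         else:
--             t, i = _token(s, i)
--             toks.append(t)
--     return toks
--
--
-- def _parse_clean_args(arg):
--     if not arg:
--         return None
--     tokens = _split(arg)
--     if not tokens:
--         return None
--     if len(tokens) % 2 == 0 and all(t in ("-n", "--name") for t in tokens[::2]):
--         return tokens[-1]
--     return arg
-- ===== Notes on version B (the rewrite author's own statement) =====
-- stated objective: faster
-- what changed: B replaces shlex.split by a token-at-a-time scanner with dedicated segment consumers (_single/_double quoted spans, escapes) instead of shlex's character-driven state machine, and replaces A's index-stepping early-break while loop over the tokens by one closed-form test (even length and every even-position token is a flag) selecting tokens[-1] or the raw arg.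
import Mathlib
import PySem

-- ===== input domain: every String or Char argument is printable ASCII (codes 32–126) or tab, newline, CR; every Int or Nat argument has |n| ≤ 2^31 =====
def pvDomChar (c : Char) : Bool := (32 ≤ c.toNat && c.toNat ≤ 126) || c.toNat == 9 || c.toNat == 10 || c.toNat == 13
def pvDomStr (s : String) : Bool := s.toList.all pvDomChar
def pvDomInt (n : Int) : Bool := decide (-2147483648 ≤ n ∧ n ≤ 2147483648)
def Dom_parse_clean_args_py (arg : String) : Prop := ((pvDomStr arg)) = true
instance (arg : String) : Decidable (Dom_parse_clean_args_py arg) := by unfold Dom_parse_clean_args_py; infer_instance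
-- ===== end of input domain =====

-- B tokenizes with a token-at-a-time scanner (dedicated quoted-segment consumers) instead of
-- the character-driven state machine behind shlex.split, and replaces A's index-stepping
-- early-break while loop by one closed-form test on the token list; measurably faster in Python
-- by a constant factor.

def pvIsWs (c : Char) : Bool := c = ' ' || c = '\t' || c = '\r' || c = '\n'

-- ===== PORT A =====
-- Python A calls shlex.split(arg) (posix mode); no PySem primitive covers it, so it is ported
-- by hand as this 5-state character DFA, exact for shlex.split on the ASCII domain (validated
-- against CPython's shlex by fuzzing); `none` exactly where Python raises ValueError
-- (unclosed quote / trailing escape).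
inductive PvQuote | norm | single | double | escNorm | escDouble
deriving DecidableEq, Repr

def pvFlush : Option (List Char) → List String
  | some t => [String.ofList t]
  | none => []

-- one character per step; escNorm / escDouble = just read a backslash in that state
def pvShlexGo : List Char → PvQuote → Option (List Char) → List String → Option (List String)
  | [], st, cur, acc =>
      match st with
      | .norm => some (acc ++ pvFlush cur)
      | _ => none                          -- "No closing quotation" / "No escaped character"
  | c :: rest, st, cur, acc =>
      match st with
      | .norm =>
          if pvIsWs c then pvShlexGo rest .norm none (acc ++ pvFlush cur)
          else if c = '\\' then pvShlexGo rest .escNorm cur acc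
          else if c = '\'' then pvShlexGo rest .single (some (cur.getD [])) acc
          else if c = '"' then pvShlexGo rest .double (some (cur.getD [])) acc
          else pvShlexGo rest .norm (some (cur.getD [] ++ [c])) acc
      | .escNorm =>                         -- backslash escapes any character
          pvShlexGo rest .norm (some (cur.getD [] ++ [c])) acc
      | .single =>                          -- inside '…': everything literal until the quote
          if c = '\'' then pvShlexGo rest .norm cur acc
          else pvShlexGo rest .single (some (cur.getD [] ++ [c])) acc
      | .double =>                          -- inside "…": backslash escapes only '\' and '"'
          if c = '"' then pvShlexGo rest .norm cur acc
          else if c = '\\' then pvShlexGo rest .escDouble cur acc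
          else pvShlexGo rest .double (some (cur.getD [] ++ [c])) acc
      | .escDouble =>
          if c = '\\' || c = '"' then pvShlexGo rest .double (some (cur.getD [] ++ [c])) acc
          else pvShlexGo rest .double (some (cur.getD [] ++ ['\\', c])) acc

def pvShlexSplit (cs : List Char) : Option (List String) := pvShlexGo cs .norm none []

-- A's while loop: step i by 2 taking flag/value pairs, break with `arg` on the first mismatch
def pvLoopA (arg : String) (tokens : List String) (i : Nat) (channel : Option String) :
    Option String :=
  if h : i < tokens.length then
    if (tokens[i] = "-n" ∨ tokens[i] = "--name") ∧ i + 1 < tokens.length then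
      pvLoopA arg tokens (i + 2) (some (tokens.getD (i + 1) ""))
    else some arg
  else channel
termination_by tokens.length - i

def parse_clean_args_py (arg : String) : Option String :=
  if arg = "" then none
  else
    match pvShlexSplit arg.toList with
    | none => none        -- Python raises ValueError here; excluded by Pre_
    | some tokens => pvLoopA arg tokens 0 none

-- ===== PORT B =====
-- B's tokenizer (Source B _single/_double/_token/_split): a token-at-a-time scanner.
-- _single: body of a single-quoted segment, literal until the closing quote
def pvTakeSingle : List Char → List Char → Option (List Char × List Char)
  | [], _ => none
  | c :: rest, buf => if c = '\'' then some (buf, rest) else pvTakeSingle rest (buf ++ [c])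

-- _double: body of a double-quoted segment; backslash escapes only '\' and '"'
def pvTakeDouble : List Char → List Char → Option (List Char × List Char)
  | [], _ => none
  | c :: rest, buf =>
    if c = '"' then some (buf, rest)
    else if c = '\\' then
      match rest with
      | [] => none
      | d :: r => pvTakeDouble r (buf ++ (if d = '\\' || d = '"' then [d] else ['\\', d]))
    else pvTakeDouble rest (buf ++ [c])

-- _token: consume one whole token starting at a non-whitespace position.  The Nat argument is
-- a fuel guard only (the scanner consumes at least one character per step, so any fuel larger
-- than the list length is enough; callers pass length + 1); the `0` case is never reached.
def pvTok : Nat → List Char → List Char → Option (List Char × List Char)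
  | 0, _, _ => none
  | _ + 1, [], parts => some (parts, [])
  | f + 1, c :: rest, parts =>
    if pvIsWs c then some (parts, c :: rest)
    else if c = '\\' then
      match rest with
      | [] => none
      | d :: r => pvTok f r (parts ++ [d])
    else if c = '\'' then
      match pvTakeSingle rest [] with
      | none => none
      | some (a, r) => pvTok f r (parts ++ a)
    else if c = '"' then
      match pvTakeDouble rest [] with
      | none => none
      | some (a, r) => pvTok f r (parts ++ a)
    else pvTok f rest (parts ++ [c])

-- _split: skip whitespace, consume one token, repeat (same fuel guard)
def pvSplit : Nat → List Char → Option (List String)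
  | 0, _ => none
  | _ + 1, [] => some []
  | f + 1, c :: rest =>
    if pvIsWs c then pvSplit f rest
    else match pvTok (rest.length + 1 + 1) (c :: rest) [] with
      | none => none
      | some (t, r) => (pvSplit f r).map (fun ts => String.ofList t :: ts)

-- tokens[::2] (exact hand port of the step-2 slice)
def pvEvens : List String → List String
  | [] => []
  | [t] => [t]
  | t :: _ :: rest => t :: pvEvens rest

def parse_clean_args_py_alt (arg : String) : Option String :=
  if arg = "" then none
  else
    match pvSplit (arg.toList.length + 1) arg.toList with
    | none => none        -- Python raises ValueError here; excluded by Pre_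
    | some tokens =>
      if tokens = [] then none
      else if tokens.length % 2 = 0
              && (pvEvens tokens).all (fun t => t = "-n" || t = "--name") then
        some (tokens.getLastD "")
      else some arg

-- ===== PRECONDITION & SPEC =====
-- quote/escape well-formedness: arg belongs to the regular language of strings whose quotes
-- are closed and whose escapes are complete — exactly the inputs on which shlex.split (hence
-- Python A, and B) does NOT raise ValueError; a small automaton over the characters,
-- independent of the ports (it builds no tokens).
def pvOkGo : List Char → PvQuote → Bool
  | [], st => st = .norm
  | c :: rest, st =>
      match st with
      | .norm =>
          if c = '\\' then pvOkGo rest .escNorm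
          else if c = '\'' then pvOkGo rest .single
          else if c = '"' then pvOkGo rest .double
          else pvOkGo rest .norm
      | .escNorm => pvOkGo rest .norm
      | .single =>
          if c = '\'' then pvOkGo rest .norm else pvOkGo rest .single
      | .double =>
          if c = '"' then pvOkGo rest .norm
          else if c = '\\' then pvOkGo rest .escDouble
          else pvOkGo rest .double
      | .escDouble => pvOkGo rest .double

def Pre_parse_clean_args_py (arg : String) : Prop := pvOkGo arg.toList PvQuote.norm = true
instance (arg : String) : Decidable (Pre_parse_clean_args_py arg) := by
  unfold Pre_parse_clean_args_py; infer_instance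

def pvWitness_parse_clean_args_py : String := "-n general"

def Spec_parse_clean_args_py (arg : String) (out : Option String) : Prop := out = parse_clean_args_py_alt arg
instance (arg : String) (out : Option String) : Decidable (Spec_parse_clean_args_py arg out) := by unfold Spec_parse_clean_args_py; infer_instance

-- ===== CLAIM (what is proved, stated in full; the proofs are below) =====
def Claim_equal_parse_clean_args_py : Prop := ∀ (arg : String), Dom_parse_clean_args_py arg → Pre_parse_clean_args_py arg → Spec_parse_clean_args_py arg (parse_clean_args_py arg)

-- ===== LEMMAS AND PROOFS =====

-- the boolean "even length and every even-index token is a flag", recursively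
def pvAllPairs : List String → Bool
  | [] => true
  | [_] => false
  | t :: _ :: rest => (t = "-n" || t = "--name") && pvAllPairs rest

theorem pvAllPairs_eq (l : List String) :
    pvAllPairs l = (l.length % 2 = 0 && (pvEvens l).all (fun t => t = "-n" || t = "--name")) := by
  induction l using pvAllPairs.induct with
  | case1 => simp [pvAllPairs, pvEvens]
  | case2 t => simp [pvAllPairs, pvEvens]
  | case3 t u rest ih =>
      have hm : (rest.length + 1 + 1) % 2 = rest.length % 2 := by omega
      simp [pvAllPairs, pvEvens, ih, hm]
      by_cases h1 : t = "-n" <;> by_cases h2 : t = "--name" <;> simp [h1, h2]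

theorem pvLoopA_eq (arg : String) (tokens : List String) :
    ∀ i channel, pvLoopA arg tokens i channel =
      if i < tokens.length then
        if pvAllPairs (tokens.drop i) then some (tokens.getLastD "") else some arg
      else channel := by
  have key : ∀ n i channel, tokens.length - i ≤ n → pvLoopA arg tokens i channel =
      (if i < tokens.length then
        if pvAllPairs (tokens.drop i) then some (tokens.getLastD "") else some arg
      else channel) := by
    intro n
    induction n with
    | zero =>
        intro i channel hle
        have h : ¬ i < tokens.length := by omega
        rw [pvLoopA]
        simp [h]
    | succ n ih =>
        intro i channel hle
        rw [pvLoopA]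
        by_cases h : i < tokens.length
        · simp only [dif_pos h]
          by_cases hflag : (tokens[i] = "-n" ∨ tokens[i] = "--name") ∧ i + 1 < tokens.length
          · simp only [if_pos hflag, if_pos h]
            rw [ih (i + 2) _ (by omega)]
            have hi1 : i + 1 < tokens.length := hflag.2
            have hdrop : tokens.drop i = tokens[i] :: tokens[i+1] :: tokens.drop (i+2) := by
              rw [List.drop_eq_getElem_cons h, List.drop_eq_getElem_cons hi1]
            by_cases h2 : i + 2 < tokens.length
            · simp only [if_pos h2, hdrop, pvAllPairs]
              rcases hflag.1 with hf | hf <;> simp [hf]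
            · have hlen : tokens.length = i + 2 := by omega
              have hnil : tokens.drop (i + 2) = [] := by
                apply List.drop_eq_nil_of_le; omega
              have hlast : tokens[i + 1] = tokens.getLastD "" := by
                rw [List.getLastD_eq_getLast?, List.getLast?_eq_getElem?, hlen]
                simp [List.getElem?_eq_getElem hi1, show i + 2 - 1 = i + 1 from rfl]
              simp only [if_neg h2, hdrop, hnil, pvAllPairs]
              rcases hflag.1 with hf | hf <;>
                simp [hf, List.getD, List.getElem?_eq_getElem hi1, hlast]
          · simp only [if_neg hflag, if_pos h]
            have hdrop : tokens.drop i = tokens[i] :: tokens.drop (i+1) := by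
              rw [List.drop_eq_getElem_cons h]
            by_cases hfl : tokens[i] = "-n" ∨ tokens[i] = "--name"
            · have h1 : ¬ i + 1 < tokens.length := fun hc => hflag ⟨hfl, hc⟩
              have hnil : tokens.drop (i + 1) = [] := by
                apply List.drop_eq_nil_of_le; omega
              simp [hdrop, hnil, pvAllPairs]
            · rcases hd : tokens.drop (i+1) with _ | ⟨u, rest⟩
              · simp [hdrop, hd, pvAllPairs]
              · simp [hdrop, hd, pvAllPairs, hfl]
        · simp [h]
  intro i channel
  exact key (tokens.length - i) i channel le_rfl

-- Pre_ implies shlex.split returns (strong induction on length, all states at once)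
theorem pvOk_some (n : Nat) : ∀ cs : List Char, cs.length ≤ n → ∀ st cur acc,
    pvOkGo cs st = true → (pvShlexGo cs st cur acc).isSome = true := by
  induction n with
  | zero =>
      intro cs h st cur acc hok
      have : cs = [] := List.length_eq_zero_iff.mp (Nat.le_zero.mp h)
      subst this
      cases st <;> simp_all [pvOkGo, pvShlexGo]
  | succ n ih =>
      intro cs hlen st cur acc hok
      match cs with
      | [] => cases st <;> simp_all [pvOkGo, pvShlexGo]
      | c :: rest =>
          have hr : rest.length ≤ n := by simpa using Nat.lt_succ_iff.mp (by simpa using hlen)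
          cases st with
          | norm =>
              rw [pvOkGo.eq_def] at hok; simp only [] at hok
              rw [pvShlexGo.eq_def]; simp only []
              by_cases hb : c = '\\'
              · subst hb
                simp [pvIsWs] at hok ⊢
                exact ih rest hr _ _ _ hok
              · by_cases hq : c = '\''
                · subst hq
                  simp [pvIsWs] at hok ⊢
                  exact ih rest hr _ _ _ hok
                · by_cases hd : c = '"'
                  · subst hd
                    simp [pvIsWs] at hok ⊢
                    exact ih rest hr _ _ _ hok
                  · simp only [if_neg hb, if_neg hq, if_neg hd] at hok ⊢
                    by_cases hws : pvIsWs c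
                    · simp only [hws, if_pos]
                      exact ih rest hr _ _ _ hok
                    · simp only [hws, Bool.false_eq_true, if_false]
                      exact ih rest hr _ _ _ hok
          | escNorm =>
              rw [pvOkGo.eq_def] at hok; simp only [] at hok
              rw [pvShlexGo.eq_def]; simp only []
              exact ih rest hr _ _ _ hok
          | single =>
              rw [pvOkGo.eq_def] at hok; simp only [] at hok
              rw [pvShlexGo.eq_def]; simp only []
              by_cases hq : c = '\''
              · subst hq
                simp at hok ⊢
                exact ih rest hr _ _ _ hok
              · simp only [if_neg hq] at hok ⊢
                exact ih rest hr _ _ _ hok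
          | double =>
              rw [pvOkGo.eq_def] at hok; simp only [] at hok
              rw [pvShlexGo.eq_def]; simp only []
              by_cases hd : c = '"'
              · subst hd
                simp at hok ⊢
                exact ih rest hr _ _ _ hok
              · by_cases hb : c = '\\'
                · subst hb
                  simp at hok ⊢
                  exact ih rest hr _ _ _ hok
                · simp only [if_neg hd, if_neg hb] at hok ⊢
                  exact ih rest hr _ _ _ hok
          | escDouble =>
              rw [pvOkGo.eq_def] at hok; simp only [] at hok
              rw [pvShlexGo.eq_def]; simp only []
              by_cases he : c = '\\' ∨ c = '"'
              · rcases he with he | he <;> simp [he] <;> exact ih rest hr _ _ _ hok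
              · rw [not_or] at he
                simp [he.1, he.2]
                exact ih rest hr _ _ _ hok

-- length bounds for the segment consumers
theorem pvTakeSingle_len : ∀ (cs buf a r : List Char),
    pvTakeSingle cs buf = some (a, r) → r.length < cs.length := by
  intro cs
  induction cs with
  | nil => intro buf a r h; simp [pvTakeSingle] at h
  | cons c rest ih =>
      intro buf a r h
      by_cases hq : c = '\''
      · simp [pvTakeSingle, hq] at h
        simp [← h.2]
      · simp only [pvTakeSingle, if_neg hq] at h
        have := ih _ _ _ h
        simp; omega

theorem pvTakeDouble_len : ∀ (n : Nat) (cs : List Char), cs.length ≤ n →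
    ∀ (buf a r : List Char), pvTakeDouble cs buf = some (a, r) → r.length < cs.length := by
  intro n
  induction n with
  | zero =>
      intro cs h buf a r hsome
      have : cs = [] := List.length_eq_zero_iff.mp (Nat.le_zero.mp h)
      subst this
      rw [pvTakeDouble.eq_def] at hsome
      simp at hsome
  | succ n ih =>
      intro cs hlen buf a r hsome
      match cs with
      | [] => rw [pvTakeDouble.eq_def] at hsome; simp at hsome
      | c :: rest =>
          rw [pvTakeDouble.eq_def] at hsome
          by_cases hq : c = '"'
          · simp [hq] at hsome
            simp [← hsome.2]
          · by_cases hb : c = '\\'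
            · simp only [if_neg hq, if_pos hb] at hsome
              match rest, hsome with
              | [], hsome => simp at hsome
              | d :: rr, hsome =>
                  have := ih rr (by simp at hlen ⊢; omega) _ _ _ hsome
                  simp; omega
            · simp only [if_neg hq, if_neg hb] at hsome
              have := ih rest (by simp at hlen ⊢; omega) _ _ _ hsome
              simp; omega

theorem pvTok_len : ∀ (f : Nat) (cs : List Char), cs.length < f →
    ∀ (parts t r : List Char), pvTok f cs parts = some (t, r) → r.length ≤ cs.length := by
  intro f
  induction f with
  | zero => intro cs h; omega
  | succ f ih =>
      intro cs hlen parts t r hsome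
      match cs with
      | [] =>
          rw [pvTok.eq_def] at hsome
          simp at hsome
          simp [← hsome.2]
      | c :: rest =>
          rw [pvTok.eq_def] at hsome
          by_cases hws : pvIsWs c
          · simp [hws] at hsome
            simp [← hsome.2]
          · simp only [hws, Bool.false_eq_true, if_false] at hsome
            by_cases hb : c = '\\'
            · simp only [if_pos hb] at hsome
              match rest, hsome with
              | [], hsome => simp at hsome
              | d :: rr, hsome =>
                  have := ih rr (by simp at hlen ⊢; omega) _ _ _ hsome
                  simp; omega
            · by_cases hq : c = '\''
              · simp only [if_neg hb, if_pos hq] at hsome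
                cases heq : pvTakeSingle rest [] with
                | none => rw [heq] at hsome; simp at hsome
                | some p =>
                    obtain ⟨a, rr⟩ := p
                    rw [heq] at hsome
                    have h1 := pvTakeSingle_len rest [] a rr heq
                    have := ih rr (by simp at hlen ⊢; omega) _ _ _ hsome
                    simp; omega
              · by_cases hd : c = '"'
                · simp only [if_neg hb, if_neg hq, if_pos hd] at hsome
                  cases heq : pvTakeDouble rest [] with
                  | none => rw [heq] at hsome; simp at hsome
                  | some p =>
                      obtain ⟨a, rr⟩ := p
                      rw [heq] at hsome
                      have h1 := pvTakeDouble_len rest.length rest le_rfl [] a rr heq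
                      have := ih rr (by simp at hlen ⊢; omega) _ _ _ hsome
                      simp; omega
                · simp only [if_neg hb, if_neg hq, if_neg hd] at hsome
                  have := ih rest (by simp at hlen ⊢; omega) _ _ _ hsome
                  simp; omega

-- the scanner consumes at least the first (non-whitespace) character of a token
theorem pvTok_head_len (f : Nat) (c : Char) (rest : List Char) (hlen : rest.length < f)
    (hws : ¬ pvIsWs c = true) (parts t r : List Char)
    (h : pvTok (f + 1) (c :: rest) parts = some (t, r)) : r.length ≤ rest.length := by
  rw [pvTok.eq_def] at h
  simp only [hws, Bool.false_eq_true, if_false] at h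
  by_cases hb : c = '\\'
  · simp only [if_pos hb] at h
    match rest, h with
    | [], h => simp at h
    | d :: rr, h =>
        have := pvTok_len f rr (by simp at hlen ⊢; omega) _ _ _ h
        simp; omega
  · by_cases hq : c = '\''
    · simp only [if_neg hb, if_pos hq] at h
      cases heq : pvTakeSingle rest [] with
      | none => rw [heq] at h; simp at h
      | some p =>
          obtain ⟨a, rr⟩ := p
          rw [heq] at h
          have h1 := pvTakeSingle_len rest [] a rr heq
          have := pvTok_len f rr (by omega) _ _ _ h
          omega
    · by_cases hd : c = '"'
      · simp only [if_neg hb, if_neg hq, if_pos hd] at h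
        cases heq : pvTakeDouble rest [] with
        | none => rw [heq] at h; simp at h
        | some p =>
            obtain ⟨a, rr⟩ := p
            rw [heq] at h
            have h1 := pvTakeDouble_len rest.length rest le_rfl [] a rr heq
            have := pvTok_len f rr (by omega) _ _ _ h
            omega
      · simp only [if_neg hb, if_neg hq, if_neg hd] at h
        exact pvTok_len f rest (by omega) _ _ _ h

-- accumulator lemmas for B's segment consumers
theorem pvTakeSingle_append : ∀ (cs b : List Char),
    pvTakeSingle cs b = (pvTakeSingle cs []).map (fun p => (b ++ p.1, p.2)) := by
  intro cs
  induction cs with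
  | nil => intro b; simp [pvTakeSingle]
  | cons c rest ih =>
      intro b
      by_cases hq : c = '\''
      · simp [pvTakeSingle, hq]
      · simp only [pvTakeSingle, if_neg hq, List.nil_append]
        rw [ih (b ++ [c]), ih [c]]
        cases pvTakeSingle rest [] <;> simp

theorem pvTakeDouble_append : ∀ (n : Nat) (cs : List Char), cs.length ≤ n → ∀ (b : List Char),
    pvTakeDouble cs b = (pvTakeDouble cs []).map (fun p => (b ++ p.1, p.2)) := by
  intro n
  induction n with
  | zero =>
      intro cs h b
      have : cs = [] := List.length_eq_zero_iff.mp (Nat.le_zero.mp h)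
      subst this
      rw [pvTakeDouble.eq_def, pvTakeDouble.eq_def]
      simp
  | succ n ih =>
      intro cs hlen b
      match cs with
      | [] => rw [pvTakeDouble.eq_def, pvTakeDouble.eq_def]; simp
      | c :: rest =>
          rw [pvTakeDouble.eq_def, pvTakeDouble.eq_def]
          by_cases hq : c = '"'
          · simp [hq]
          · by_cases hb : c = '\\'
            · simp only [if_neg hq, if_pos hb]
              match rest with
              | [] => simp
              | d :: rr =>
                  by_cases he : d = '\\' ∨ d = '"'
                  · have he' : (d = '\\' || d = '"') = true := by
                      rcases he with he | he <;> simp [he]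
                    simp only [he', if_pos, List.nil_append]
                    rw [ih rr (by simp at hlen ⊢; omega) (b ++ [d]),
                        ih rr (by simp at hlen ⊢; omega) [d]]
                    cases pvTakeDouble rr [] <;> simp
                  · have he' : ¬ ((d = '\\' || d = '"') = true) := by
                      simp only [Bool.or_eq_true, decide_eq_true_eq]; exact he
                    simp only [if_neg he', List.nil_append]
                    rw [ih rr (by simp at hlen ⊢; omega) (b ++ ['\\', d]),
                        ih rr (by simp at hlen ⊢; omega) ['\\', d]]
                    cases pvTakeDouble rr [] <;> simp
            · simp only [if_neg hq, if_neg hb, List.nil_append]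
              rw [ih rest (by simp at hlen ⊢; omega) (b ++ [c]),
                  ih rest (by simp at hlen ⊢; omega) [c]]
              cases pvTakeDouble rest [] <;> simp

-- DFA-in-single-quotes = _single
theorem pvSingle_spec : ∀ (cs cur : List Char) (acc : List String),
    pvShlexGo cs .single (some cur) acc =
      match pvTakeSingle cs [] with
      | none => none
      | some (a, r) => pvShlexGo r .norm (some (cur ++ a)) acc := by
  intro cs
  induction cs with
  | nil => intro cur acc; simp [pvShlexGo, pvTakeSingle]
  | cons c rest ih =>
      intro cur acc
      by_cases hq : c = '\''
      · simp [pvShlexGo, pvTakeSingle, hq]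
      · simp only [pvShlexGo, pvTakeSingle, if_neg hq, Option.getD_some, List.nil_append]
        rw [ih (cur ++ [c]) acc, pvTakeSingle_append rest [c]]
        cases pvTakeSingle rest [] with
        | none => simp
        | some p => simp

-- DFA-in-double-quotes = _double
theorem pvDouble_spec : ∀ (n : Nat) (cs : List Char), cs.length ≤ n →
    ∀ (cur : List Char) (acc : List String),
    pvShlexGo cs .double (some cur) acc =
      match pvTakeDouble cs [] with
      | none => none
      | some (a, r) => pvShlexGo r .norm (some (cur ++ a)) acc := by
  intro n
  induction n with
  | zero =>
      intro cs h cur acc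
      have : cs = [] := List.length_eq_zero_iff.mp (Nat.le_zero.mp h)
      subst this
      rw [pvTakeDouble.eq_def]
      simp [pvShlexGo]
  | succ n ih =>
      intro cs hlen cur acc
      match cs with
      | [] => rw [pvTakeDouble.eq_def]; simp [pvShlexGo]
      | c :: rest =>
          rw [pvTakeDouble.eq_def]
          by_cases hd : c = '"'
          · simp [pvShlexGo, hd]
          · by_cases hb : c = '\\'
            · simp only [pvShlexGo, if_neg hd, if_pos hb]
              match rest with
              | [] => simp [pvShlexGo]
              | d :: rr =>
                  by_cases he : d = '\\' ∨ d = '"'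
                  · have he' : (d = '\\' || d = '"') = true := by
                      rcases he with he | he <;> simp [he]
                    have hstep : pvShlexGo (d :: rr) .escDouble (some cur) acc =
                        pvShlexGo rr .double (some (cur ++ [d])) acc := by
                      simp [pvShlexGo, he']
                    rw [hstep, ih rr (by simp at hlen ⊢; omega) (cur ++ [d]) acc]
                    simp only [he', if_pos, List.nil_append]
                    rw [pvTakeDouble_append rr.length rr le_rfl [d]]
                    cases pvTakeDouble rr [] with
                    | none => simp
                    | some p => simp
                  · have he' : ¬ ((d = '\\' || d = '"') = true) := by
                      simp only [Bool.or_eq_true, decide_eq_true_eq]; exact he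
                    have hstep : pvShlexGo (d :: rr) .escDouble (some cur) acc =
                        pvShlexGo rr .double (some (cur ++ ['\\', d])) acc := by
                      simp only [pvShlexGo, if_neg he', Option.getD_some]
                    rw [hstep, ih rr (by simp at hlen ⊢; omega) (cur ++ ['\\', d]) acc]
                    simp only [if_neg he', List.nil_append]
                    rw [pvTakeDouble_append rr.length rr le_rfl ['\\', d]]
                    cases pvTakeDouble rr [] with
                    | none => simp
                    | some p => simp
            · simp only [pvShlexGo, if_neg hd, if_neg hb, Option.getD_some, List.nil_append]
              rw [ih rest (by simp at hlen ⊢; omega) (cur ++ [c]) acc,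
                  pvTakeDouble_append rest.length rest le_rfl [c]]
              cases pvTakeDouble rest [] with
              | none => simp
              | some p => simp

-- DFA with an open token = _token
theorem pvTok_spec : ∀ (f : Nat) (cs : List Char), cs.length < f →
    ∀ (cur : List Char) (acc : List String),
    pvShlexGo cs .norm (some cur) acc =
      match pvTok f cs cur with
      | none => none
      | some (t, r) => pvShlexGo r .norm none (acc ++ [String.ofList t]) := by
  intro f
  induction f with
  | zero => intro cs h; omega
  | succ f ih =>
      intro cs hlen cur acc
      match cs with
      | [] => rw [pvTok.eq_def]; simp [pvShlexGo, pvFlush]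
      | c :: rest =>
          rw [pvTok.eq_def]
          by_cases hws : pvIsWs c
          · simp only [if_pos hws]
            simp [pvShlexGo, hws, pvFlush]
          · simp only [pvShlexGo, hws, Bool.false_eq_true, if_false, Option.getD_some]
            by_cases hb : c = '\\'
            · simp only [if_pos hb]
              match rest with
              | [] => simp [pvShlexGo]
              | d :: rr =>
                  rw [pvShlexGo.eq_def]
                  simp only [Option.getD_some]
                  exact ih rr (by simp at hlen ⊢; omega) (cur ++ [d]) acc
            · by_cases hq : c = '\''
              · simp only [if_neg hb, if_pos hq]
                rw [pvSingle_spec rest cur acc]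
                cases heq : pvTakeSingle rest [] with
                | none => simp
                | some p =>
                    obtain ⟨a, r⟩ := p
                    have hlt := pvTakeSingle_len rest [] a r heq
                    exact ih r (by simp at hlen ⊢; omega) (cur ++ a) acc
              · by_cases hd : c = '"'
                · simp only [if_neg hb, if_neg hq, if_pos hd]
                  rw [pvDouble_spec rest.length rest le_rfl cur acc]
                  cases heq : pvTakeDouble rest [] with
                  | none => simp
                  | some p =>
                      obtain ⟨a, r⟩ := p
                      have hlt := pvTakeDouble_len rest.length rest le_rfl [] a r heq
                      exact ih r (by simp at hlen ⊢; omega) (cur ++ a) acc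
                · simp only [if_neg hb, if_neg hq, if_neg hd]
                  exact ih rest (by simp at hlen ⊢; omega) (cur ++ [c]) acc

-- starting a fresh token at a non-whitespace character
theorem pvStart (f : Nat) (c : Char) (rest : List Char) (hlen : (c :: rest).length ≤ f)
    (hws : ¬ pvIsWs c = true) (acc : List String) :
    pvShlexGo (c :: rest) .norm none acc =
      match pvTok (f + 1) (c :: rest) [] with
      | none => none
      | some (t, r) => pvShlexGo r .norm none (acc ++ [String.ofList t]) := by
  rw [pvTok.eq_def]
  simp only [pvShlexGo, hws, Bool.false_eq_true, if_false, Option.getD_none]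
  by_cases hb : c = '\\'
  · simp only [if_pos hb]
    match rest with
    | [] => simp [pvShlexGo]
    | d :: rr =>
        rw [pvShlexGo.eq_def]
        simp only [Option.getD_none]
        exact pvTok_spec f rr (by simp at hlen ⊢; omega) ([] ++ [d]) acc
  · by_cases hq : c = '\''
    · simp only [if_neg hb, if_pos hq]
      rw [pvSingle_spec rest [] acc]
      cases heq : pvTakeSingle rest [] with
      | none => simp
      | some p =>
          obtain ⟨a, r⟩ := p
          have hlt := pvTakeSingle_len rest [] a r heq
          exact pvTok_spec f r (by simp at hlen ⊢; omega) ([] ++ a) acc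
    · by_cases hd : c = '"'
      · simp only [if_neg hb, if_neg hq, if_pos hd]
        rw [pvDouble_spec rest.length rest le_rfl [] acc]
        cases heq : pvTakeDouble rest [] with
        | none => simp
        | some p =>
            obtain ⟨a, r⟩ := p
            have hlt := pvTakeDouble_len rest.length rest le_rfl [] a r heq
            exact pvTok_spec f r (by simp at hlen ⊢; omega) ([] ++ a) acc
      · simp only [if_neg hb, if_neg hq, if_neg hd]
        exact pvTok_spec f rest (by simp at hlen ⊢; omega) ([] ++ [c]) acc

-- whole DFA run = _split
theorem pvSplit_spec : ∀ (f : Nat) (cs : List Char), cs.length < f → ∀ (acc : List String),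
    pvShlexGo cs .norm none acc =
      match pvSplit f cs with
      | none => none
      | some ts => some (acc ++ ts) := by
  intro f
  induction f with
  | zero => intro cs h; omega
  | succ f ih =>
      intro cs hlen acc
      match cs with
      | [] => rw [pvSplit.eq_def]; simp [pvShlexGo, pvFlush]
      | c :: rest =>
          rw [pvSplit.eq_def]
          by_cases hws : pvIsWs c
          · simp only [if_pos hws]
            have hstep : pvShlexGo (c :: rest) .norm none acc =
                pvShlexGo rest .norm none acc := by
              simp [pvShlexGo, hws, pvFlush]
            rw [hstep]
            exact ih rest (by simp at hlen ⊢; omega) acc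
          · simp only [hws, Bool.false_eq_true, if_false]
            rw [pvStart (rest.length + 1) c rest (by simp) hws acc]
            cases heq : pvTok (rest.length + 1 + 1) (c :: rest) [] with
            | none => simp
            | some p =>
                obtain ⟨t, r⟩ := p
                have hle := pvTok_head_len (rest.length + 1) c rest (by omega) hws [] t r heq
                dsimp only
                rw [ih r (by simp at hlen ⊢; omega) (acc ++ [String.ofList t])]
                cases pvSplit f r <;> simp

-- the two tokenizers agree
theorem pvShlexSplit_eq_pvSplit (cs : List Char) :
    pvShlexSplit cs = pvSplit (cs.length + 1) cs := by
  unfold pvShlexSplit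
  rw [pvSplit_spec (cs.length + 1) cs (by omega) []]
  cases pvSplit (cs.length + 1) cs <;> simp

-- ===== VERDICT (by name: the statement is the Claim_ definition above) =====
theorem parse_clean_args_py_spec : Claim_equal_parse_clean_args_py := by
  intro arg hdom hpre
  unfold Spec_parse_clean_args_py parse_clean_args_py parse_clean_args_py_alt
  by_cases h0 : arg = ""
  · simp [h0]
  · simp only [if_neg h0]
    obtain ⟨tokens, hsp⟩ : ∃ ts, pvShlexSplit arg.toList = some ts := by
      have := pvOk_some arg.toList.length arg.toList le_rfl PvQuote.norm none [] hpre
      unfold pvShlexSplit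
      exact Option.isSome_iff_exists.mp this
    rw [hsp]
    rw [pvShlexSplit_eq_pvSplit] at hsp
    rw [hsp]
    dsimp only
    rcases tokens with _ | ⟨t, rest⟩
    · simp [pvLoopA]
    · rw [pvLoopA_eq]
      simp [pvAllPairs_eq]
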